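-- pv_equiv track=rewrite | github.com/fernaldifz/classical-cryptography | src/playfairCipher.py | matrixFactoryDec
-- ===== SOURCE A (Python) =====
-- def matrixFactoryDec(cipherText):
--     jMemory = []; counter = 0
--
--     matrixRow = len(cipherText) // 2
--     matrixPFC = [[j for j in range(0,2)] for i in range(0,matrixRow)]
--
--     for row in range(0,matrixRow):
--         for col in range(0,2):
--             if cipherText[counter] == 'J':
--                 jMemory.append(counter)
--                 matrixPFC[row][col] = 'I'
--             else:
--                 matrixPFC[row][col] = cipherText[counter]
--
--             counter += 1
--
--     return matrixPFC, jMemory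
-- ===== SOURCE B (Python) =====
-- def matrixFactoryDec(cipherText):
--     n = (len(cipherText) // 2) * 2
--     prefix = cipherText[:n]
--     jMemory = [i for i, c in enumerate(prefix) if c == 'J']
--     sub = ['I' if c == 'J' else c for c in prefix]
--     matrixPFC = [sub[i:i+2] for i in range(0, n, 2)]
--     return matrixPFC, jMemory
-- ===== Notes on version B (the rewrite author's own statement) =====
-- stated objective: simpler
-- what changed: Replaces the pre-allocated matrix mutated cell-by-cell through an index-driven nested loop with three independent passes: a comprehension collecting J positions, a comprehension substituting I for J, and chunking the substituted list into length-2 rows.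
import Mathlib
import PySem

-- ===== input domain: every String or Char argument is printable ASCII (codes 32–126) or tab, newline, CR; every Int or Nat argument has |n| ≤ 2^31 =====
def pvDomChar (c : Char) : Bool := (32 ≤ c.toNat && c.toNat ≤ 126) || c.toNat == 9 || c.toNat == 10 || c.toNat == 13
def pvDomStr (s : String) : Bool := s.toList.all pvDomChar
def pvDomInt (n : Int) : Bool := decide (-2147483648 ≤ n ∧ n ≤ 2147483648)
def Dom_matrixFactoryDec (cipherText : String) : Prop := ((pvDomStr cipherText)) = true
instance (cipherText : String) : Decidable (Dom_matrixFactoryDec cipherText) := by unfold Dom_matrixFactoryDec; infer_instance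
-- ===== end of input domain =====

-- B replaces A's index-driven nested loop mutating a pre-allocated matrix by three independent
-- passes (collect J positions, substitute, chunk into rows); objective: simpler.

-- ===== PORT A =====
-- body of A's outer loop (one row: the inner 'for col in range(0,2)' loop);
-- state = (matrixPFC, (jMemory, counter))
def pvStepA (ct : String) (st : List (List String) × List Int × Int) (row : Int) :
    List (List String) × List Int × Int :=
  (PySem.List.pyRange 0 2 1).foldl (fun st col =>
    match PySem.Str.pyGet? ct st.2.2 with
    | none => st  -- unreachable: counter stays below len(ct) (2*(len//2) ≤ len)
    | some c =>
      if c = 'J' then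
        (st.1.set row.toNat ((st.1.getD row.toNat []).set col.toNat "I"),
         st.2.1 ++ [st.2.2], st.2.2 + 1)
      else
        (st.1.set row.toNat ((st.1.getD row.toNat []).set col.toNat (String.singleton c)),
         st.2.1, st.2.2 + 1)) st

def matrixFactoryDec (cipherText : String) : List (List String) × List Int :=
  let matrixRow : Int := PySem.Int.floordiv (PySem.Str.len cipherText) 2
  -- Python pre-fills the matrix with the ints 0,1, which are always overwritten;
  -- ported as their str images (the result never contains them)
  let matrixPFC : List (List String) :=
    (PySem.List.pyRange 0 matrixRow 1).map
      (fun _i => (PySem.List.pyRange 0 2 1).map (fun j => PySem.Int.toStr j))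
  let st := (PySem.List.pyRange 0 matrixRow 1).foldl (pvStepA cipherText) (matrixPFC, [], 0)
  (st.1, st.2.1)

-- ===== PORT B =====
def matrixFactoryDec_alt (cipherText : String) : List (List String) × List Int :=
  let n : Int := PySem.Int.floordiv (PySem.Str.len cipherText) 2 * 2
  let pfx : List Char := (PySem.Str.slice cipherText none (some n)).toList
  let jMemory : List Int :=
    ((PySem.List.enumerate pfx 0).filter (fun p => p.2 == 'J')).map (fun p => p.1)
  let sub : List String := pfx.map (fun c => if c = 'J' then "I" else String.singleton c)
  let matrixPFC : List (List String) :=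
    (PySem.List.pyRange 0 n 2).map (fun i => PySem.List.slice sub (some i) (some (i + 2)))
  (matrixPFC, jMemory)

-- ===== PRECONDITION & SPEC =====
def Spec_matrixFactoryDec (cipherText : String) (out : List (List String) × List Int) : Prop := out = matrixFactoryDec_alt cipherText
instance (cipherText : String) (out : List (List String) × List Int) : Decidable (Spec_matrixFactoryDec cipherText out) := by unfold Spec_matrixFactoryDec; infer_instance

-- ===== CLAIM (what is proved, stated in full; the proofs are below) =====
def Claim_equal_matrixFactoryDec : Prop := ∀ (cipherText : String), Dom_matrixFactoryDec cipherText → Spec_matrixFactoryDec cipherText (matrixFactoryDec cipherText)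

-- ===== LEMMAS AND PROOFS =====

-- the common value: substitution of one character
def pvSub (c : Char) : String := if c = 'J' then "I" else String.singleton c

-- the common shape: process an (even-length) character list two at a time,
-- i is the absolute index of the first character
def pvGo : Int → List Char → List (List String) × List Int
  | _, [] => ([], [])
  | _, [_] => ([], [])
  | i, c1 :: c2 :: rest =>
    let r := pvGo (i + 2) rest
    ([pvSub c1, pvSub c2] :: r.1,
     ((if c1 = 'J' then [i] else []) ++ (if c2 = 'J' then [i + 1] else [])) ++ r.2)

-- the placeholder row A allocates
def pvPh : List String := (PySem.List.pyRange 0 2 1).map (fun j => PySem.Int.toStr j)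

lemma pvPh_eq : pvPh = ["0", "1"] := by decide

lemma pv_set_append_len {α : Type} (d : List α) (y z : α) (t : List α) :
    (d ++ y :: t).set d.length z = d ++ z :: t := by
  induction d with
  | nil => rfl
  | cons a as ih => simp [ih]

lemma pv_getD_append_len {α : Type} (d : List α) (y : α) (t : List α) (dflt : α) :
    (d ++ y :: t).getD d.length dflt = y := by
  simp [List.getD]

lemma pvStepA_eval (ct : String) (done t : List (List String)) (jm : List Int) (cnt : Int)
    (c1 c2 : Char) (a : Nat) (ha : done.length = a)
    (h1 : PySem.Str.pyGet? ct cnt = some c1)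
    (h2 : PySem.Str.pyGet? ct (cnt + 1) = some c2) :
    pvStepA ct (done ++ pvPh :: t, jm, cnt) ((a : Nat) : Int) =
      (done ++ [pvSub c1, pvSub c2] :: t,
       jm ++ ((if c1 = 'J' then [cnt] else []) ++ (if c2 = 'J' then [cnt + 1] else [])),
       cnt + 2) := by
  subst ha
  unfold pvStepA
  rw [show PySem.List.pyRange 0 2 1 = [0, 1] from by decide]
  simp only [List.foldl_cons, List.foldl_nil]
  rw [h1]
  have h2' : PySem.List.pyGet? ct.toList (cnt + 1) = some c2 := by simpa using h2
  by_cases hc1 : c1 = 'J' <;> by_cases hc2 : c2 = 'J' <;>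
    simp [hc1, hc2, pvPh_eq, pv_getD_append_len, pv_set_append_len, pvSub, h2, h2',
      Int.toNat_zero, Int.toNat_one] <;>
    try omega

lemma pv_loopA (ct : String) : ∀ (k a : Nat) (rest : List Char) (done : List (List String))
    (jm : List Int), done.length = a → ct.toList.drop (2 * a) = rest → 2 * k ≤ rest.length →
    (PySem.List.pyRange (a : Int) ((a : Int) + (k : Int)) 1).foldl (pvStepA ct)
        (done ++ List.replicate k pvPh, jm, ((2 * a : Nat) : Int)) =
      (done ++ (pvGo ((2 * a : Nat) : Int) (rest.take (2 * k))).1,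
       jm ++ (pvGo ((2 * a : Nat) : Int) (rest.take (2 * k))).2,
       ((2 * (a + k) : Nat) : Int)) := by
  intro k
  induction k with
  | zero =>
    intro a rest done jm _ _ _
    rw [PySem.List.pyRange_one_eq_nil (by omega)]
    simp [pvGo]
  | succ k ih =>
    intro a rest done jm hlen hdrop hk
    obtain ⟨c1, c2, rest2, rfl⟩ : ∃ c1 c2 rest2, rest = c1 :: c2 :: rest2 := by
      match rest, hk with
      | c1 :: c2 :: rest2, _ => exact ⟨c1, c2, rest2, rfl⟩
    have h1 : PySem.Str.pyGet? ct ((2 * a : Nat) : Int) = some c1 := by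
      rw [PySem.Str.pyGet?_natCast]
      have h := congrArg (fun l => l[0]?) hdrop
      simp only [List.getElem?_drop] at h
      simpa using h
    have h2 : PySem.Str.pyGet? ct (((2 * a : Nat) : Int) + 1) = some c2 := by
      rw [show ((2 * a : Nat) : Int) + 1 = ((2 * a + 1 : Nat) : Int) by push_cast; ring,
        PySem.Str.pyGet?_natCast]
      have h := congrArg (fun l => l[1]?) hdrop
      simp only [List.getElem?_drop] at h
      simpa using h
    have hdrop2 : ct.toList.drop (2 * (a + 1)) = rest2 := by
      have h : (ct.toList.drop (2 * a)).drop 2 = rest2 := by rw [hdrop]; rfl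
      rw [List.drop_drop] at h
      rw [show 2 * (a + 1) = 2 * a + 2 by ring]
      exact h
    rw [PySem.List.pyRange_one_cons (by push_cast; omega), List.foldl_cons,
      List.replicate_succ]
    rw [pvStepA_eval ct done (List.replicate k pvPh) jm _ c1 c2 a hlen h1 h2]
    rw [show ((a : Int) + 1) = ((a + 1 : Nat) : Int) by push_cast; ring]
    rw [show ((a : Int) + ((k + 1 : Nat) : Int)) = (((a + 1 : Nat) : Int) + ((k : Nat) : Int))
      by push_cast; ring]
    rw [show (((2 * a : Nat) : Int) + 2) = ((2 * (a + 1) : Nat) : Int) by push_cast; ring]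
    rw [List.append_cons done _ (List.replicate k pvPh)]
    rw [ih (a + 1) rest2 (done ++ [[pvSub c1, pvSub c2]]) _ (by simp [hlen]) hdrop2
      (by simp at hk ⊢; omega)]
    have hgo : pvGo ((2 * a : Nat) : Int) ((c1 :: c2 :: rest2).take (2 * (k + 1))) =
        ([pvSub c1, pvSub c2] :: (pvGo (((2 * a : Nat) : Int) + 2) (rest2.take (2 * k))).1,
         ((if c1 = 'J' then [((2 * a : Nat) : Int)] else []) ++
          (if c2 = 'J' then [((2 * a : Nat) : Int) + 1] else [])) ++
         (pvGo (((2 * a : Nat) : Int) + 2) (rest2.take (2 * k))).2) := by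
      rw [show 2 * (k + 1) = 2 * k + 1 + 1 by ring]
      simp [pvGo, List.take_succ_cons]
    rw [hgo]
    rw [show (((2 * a : Nat) : Int) + 2) = ((2 * (a + 1) : Nat) : Int) by push_cast; ring]
    rw [show 2 * (a + 1 + k) = 2 * (a + (k + 1)) by ring]
    simp [List.append_assoc]

-- A computes pvGo on the even-length prefix
lemma pvA_eq (ct : String) :
    matrixFactoryDec ct = ((pvGo 0 (ct.toList.take (2 * (ct.toList.length / 2)))).1,
      (pvGo 0 (ct.toList.take (2 * (ct.toList.length / 2)))).2) := by
  dsimp only [matrixFactoryDec]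
  have hR : PySem.Int.floordiv (PySem.Str.len ct) 2 = ((ct.toList.length / 2 : Nat) : Int) := by
    rw [PySem.Str.len_eq]
    exact_mod_cast PySem.Int.floordiv_natCast ct.toList.length 2
  rw [hR]
  have hmat : (PySem.List.pyRange 0 ((ct.toList.length / 2 : Nat) : Int) 1).map
      (fun _i => (PySem.List.pyRange 0 2 1).map (fun j => PySem.Int.toStr j)) =
      List.replicate (ct.toList.length / 2) pvPh := by
    rw [List.map_const', PySem.List.length_pyRange_one]
    simp [pvPh]
    omega
  rw [hmat]
  have h := pv_loopA ct (ct.toList.length / 2) 0 ct.toList [] [] rfl (by simp) (by omega)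
  simp only [Nat.cast_zero, Int.zero_add, Nat.zero_add, Nat.mul_zero, List.nil_append] at h
  rw [h]

-- B-side: the J-position comprehension is pvGo's second component
lemma pvB_jmem : ∀ (m : Nat) (i : Int) (l : List Char), l.length = 2 * m →
    ((PySem.List.enumerate l i).filter (fun p => p.2 == 'J')).map (fun p => p.1) =
      (pvGo i l).2 := by
  intro m
  induction m with
  | zero =>
    intro i l h
    match l, h with
    | [], _ => simp [pvGo]
  | succ m ih =>
    intro i l h
    match l, h with
    | c1 :: c2 :: rest, h =>
      have hr : rest.length = 2 * m := by simp at h; omega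
      rw [PySem.List.enumerate_cons, PySem.List.enumerate_cons]
      by_cases hc1 : c1 = 'J' <;> by_cases hc2 : c2 = 'J' <;>
        simp [pvGo, hc1, hc2] <;>
        (rw [show (i : Int) + 1 + 1 = i + 2 by ring]; exact ih (i + 2) rest hr)

-- B-side: the chunking comprehension is pvGo's first component
lemma pvB_chunk : ∀ (m : Nat) (i : Int) (l : List Char), l.length = 2 * m →
    (List.range m).map (fun k => ((l.map pvSub).drop (2 * k)).take 2) = (pvGo i l).1 := by
  intro m
  induction m with
  | zero =>
    intro i l h
    match l, h with
    | [], _ => simp [pvGo]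
  | succ m ih =>
    intro i l h
    match l, h with
    | c1 :: c2 :: rest, h =>
      have hr : rest.length = 2 * m := by simp at h; omega
      rw [List.range_succ_eq_map, List.map_cons, List.map_map]
      have hfun : ∀ k, ((fun k => (((c1 :: c2 :: rest).map pvSub).drop (2 * k)).take 2) ∘
          Nat.succ) k = (fun k => ((rest.map pvSub).drop (2 * k)).take 2) k := by
        intro k
        simp [Function.comp, show 2 * (k + 1) = (2 * k) + 1 + 1 by ring]
      rw [List.map_congr_left (fun k _ => hfun k), ih (i + 2) rest hr]
      simp [pvGo, pvSub]

-- B computes pvGo on the even-length prefix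
lemma pvB_eq (ct : String) :
    matrixFactoryDec_alt ct = ((pvGo 0 (ct.toList.take (2 * (ct.toList.length / 2)))).1,
      (pvGo 0 (ct.toList.take (2 * (ct.toList.length / 2)))).2) := by
  dsimp only [matrixFactoryDec_alt]
  have hn : PySem.Int.floordiv (PySem.Str.len ct) 2 * 2 = ((2 * (ct.toList.length / 2) : Nat) : Int) := by
    rw [PySem.Str.len_eq]
    rw [show PySem.Int.floordiv ((ct.toList.length : Nat) : Int) 2 = ((ct.toList.length / 2 : Nat) : Int) from
      by exact_mod_cast PySem.Int.floordiv_natCast ct.toList.length 2]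
    push_cast; ring
  rw [hn]
  have hpfx : (PySem.Str.slice ct none (some ((2 * (ct.toList.length / 2) : Nat) : Int))).toList =
      ct.toList.take (2 * (ct.toList.length / 2)) := by
    rw [PySem.Str.toList_slice, PySem.Chars.slice_eq_listSlice,
      PySem.List.slice_to _ (by positivity)]
    simp
    omega
  rw [hpfx]
  set l := ct.toList.take (2 * (ct.toList.length / 2)) with hl
  have hlen : l.length = 2 * (ct.toList.length / 2) := by
    rw [hl, List.length_take]
    omega
  refine Prod.ext ?_ (pvB_jmem (ct.toList.length / 2) 0 l hlen)
  -- matrix component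
  show (PySem.List.pyRange 0 ((2 * (ct.toList.length / 2) : Nat) : Int) 2).map
      (fun i => PySem.List.slice (l.map (fun c => if c = 'J' then "I" else String.singleton c))
        (some i) (some (i + 2))) = (pvGo 0 l).1
  have hsub : (fun c => if c = 'J' then "I" else String.singleton c) = pvSub := rfl
  rw [hsub]
  set m := ct.toList.length / 2 with hm
  rw [PySem.List.pyRange_of_pos _ _ (by norm_num)]
  have hcount : (if (0 : Int) < ((2 * m : Nat) : Int) then
      ((((2 * m : Nat) : Int) - 0 + 2 - 1) / 2).toNat else 0) = m := by
    split_ifs with h0 <;> omega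
  rw [hcount]
  have hfun : ∀ k, k ∈ List.range m →
      PySem.List.slice (l.map pvSub) (some (0 + 2 * (k : Int))) (some (0 + 2 * (k : Int) + 2)) =
        ((l.map pvSub).drop (2 * k)).take 2 := by
    intro k _
    rw [show (0 + 2 * (k : Int)) = ((2 * k : Nat) : Int) by push_cast; ring,
      show ((2 * k : Nat) : Int) + 2 = ((2 * k + 2 : Nat) : Int) by push_cast; ring,
      PySem.List.slice_natCast]
    simp
  rw [List.map_map]
  have hcomp : (List.range m).map ((fun i => PySem.List.slice (l.map pvSub) (some i)
      (some (i + 2))) ∘ (fun k : Nat => 0 + 2 * (k : Int))) =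
      (List.range m).map (fun k => ((l.map pvSub).drop (2 * k)).take 2) :=
    List.map_congr_left (fun k hk => by simpa using hfun k hk)
  rw [hcomp]
  exact pvB_chunk m 0 l hlen

-- ===== VERDICT (by name: the statement is the Claim_ definition above) =====
theorem matrixFactoryDec_spec : Claim_equal_matrixFactoryDec := by
  intro ct _
  show matrixFactoryDec ct = matrixFactoryDec_alt ct
  rw [pvA_eq, pvB_eq]
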